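-- pv_equiv track=rewrite | github.com/brianwisti/dendron-hugo | build_scripts/pull.py | build_note_tree
-- ===== SOURCE A (Python) =====
-- def build_note_tree(fnames: list[str]) -> dict[str, str]:
--     """Return a tree of notes from a list of fnames."""
--     root_note = "root"
--     tree = {}
--     tree[root_note] = ""
--     non_root_fnames = [fname for fname in fnames if fname != root_note]
--
--     for current_fname in non_root_fnames:
--         parent = root_note
--         candidates = sorted(
--             [
--                 fname
--                 for fname in fnames
--                 if fname != current_fname and current_fname.startswith(f"{fname}.")
--             ]
--         )
--
--         if candidates:
--             parent = candidates[-1]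
--
--         tree[current_fname] = parent
--
--     return tree
-- ===== SOURCE B (Python) =====
-- def build_note_tree(fnames: list[str]) -> dict[str, str]:
--     """Return a tree of notes from a list of fnames."""
--     names = set(fnames)
--     tree = {"root": ""}
--     for cur in fnames:
--         if cur == "root":
--             continue
--         parent = "root"
--         for i in range(len(cur) - 1, -1, -1):
--             if cur[i] == ".":
--                 p = cur[:i]
--                 if p in names:
--                     parent = p
--                     break
--         tree[cur] = parent
--     return tree
-- ===== Notes on version B (the rewrite author's own statement) =====
-- stated objective: faster
-- what changed: Replaces the per-note scan over all fnames plus sort with a precomputed set of fnames and a right-to-left scan over the note's own characters picking the longest dot-prefix present in the set.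
import Mathlib
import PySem

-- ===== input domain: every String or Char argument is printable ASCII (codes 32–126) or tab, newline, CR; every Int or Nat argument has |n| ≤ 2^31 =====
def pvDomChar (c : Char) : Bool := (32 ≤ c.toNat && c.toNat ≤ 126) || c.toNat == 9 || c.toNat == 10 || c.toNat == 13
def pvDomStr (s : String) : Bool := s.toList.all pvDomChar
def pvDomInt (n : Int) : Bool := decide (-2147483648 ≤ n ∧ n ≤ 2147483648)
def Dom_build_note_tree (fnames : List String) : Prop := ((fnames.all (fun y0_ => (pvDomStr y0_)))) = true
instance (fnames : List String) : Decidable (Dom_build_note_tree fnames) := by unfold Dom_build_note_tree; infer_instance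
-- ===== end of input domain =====

-- B replaces A's per-note scan over all fnames plus a sort by one precomputed set of fnames
-- and a right-to-left scan of the note's own characters for the longest dot-prefix: faster.


-- ===== PORT A =====
-- A: tree = {"root": ""}; for each non-root fname, parent = last of sorted([f for f in fnames
--    if f != cur and cur.startswith(f + ".")]) (or "root" if none); tree[cur] = parent.
def build_note_tree (fnames : List String) : List (String × String) :=
  let root_note := "root"
  let tree : PySem.Dict String String := PySem.Dict.insert PySem.Dict.empty root_note ""
  let non_root_fnames := fnames.filter (fun fname => decide (fname ≠ root_note))
  let tree := non_root_fnames.foldl (fun tree current_fname =>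
    let candidates := PySem.List.sorted
      (fnames.filter (fun fname =>
        decide (fname ≠ current_fname) && PySem.Str.startswith current_fname (fname ++ ".")))
      (fun x => x) false
    let parent := if candidates.isEmpty then root_note else candidates.getLast!
    tree.insert current_fname parent) tree
  tree.items

-- ===== PORT B =====
-- for i in range(len(cur)-1, -1, -1): if cur[i] == ".": p = cur[:i]; if p in names: return p
def altFind (names : PySem.Set String) (cur : String) : Nat → String
  | 0 => "root"
  | i + 1 =>
    if PySem.Str.pyGet? cur (i : Int) = some '.' then
      let p := PySem.Str.slice cur none (some (i : Int))
      if PySem.Set.contains names p then p else altFind names cur i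
    else altFind names cur i

def build_note_tree_alt (fnames : List String) : List (String × String) :=
  let names : PySem.Set String := PySem.Set.ofList fnames
  let tree : PySem.Dict String String := PySem.Dict.insert PySem.Dict.empty "root" ""
  (fnames.foldl (fun tree cur =>
      if cur = "root" then tree
      else tree.insert cur (altFind names cur cur.toList.length)) tree).items

-- ===== PRECONDITION & SPEC =====
def Spec_build_note_tree (fnames : List String) (out : List (String × String)) : Prop := out = build_note_tree_alt fnames
instance (fnames : List String) (out : List (String × String)) : Decidable (Spec_build_note_tree fnames out) := by unfold Spec_build_note_tree; infer_instance

-- ===== CLAIM (what is proved, stated in full; the proofs are below) =====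
def Claim_equal_build_note_tree : Prop := ∀ (fnames : List String), Dom_build_note_tree fnames → Spec_build_note_tree fnames (build_note_tree fnames)

-- ===== LEMMAS AND PROOFS =====

-- "index i of cur is a dot and the prefix before it is one of the fnames"
def QD (fnames : List String) (cs : List Char) (i : Nat) : Prop :=
  cs[i]? = some '.' ∧ String.ofList (cs.take i) ∈ fnames

theorem lex_of_prefix {α : Type} [LT α] {p q : List α} (h : p <+: q) (hne : p ≠ q) :
    List.Lex (· < ·) p q := by
  induction p generalizing q with
  | nil =>
    cases q with
    | nil => exact absurd rfl hne
    | cons b t => exact List.Lex.nil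
  | cons a t ih =>
    obtain ⟨r, rfl⟩ := h
    cases r with
    | nil => simp at hne
    | cons b s =>
      refine List.Lex.cons (ih ⟨b :: s, rfl⟩ ?_)
      intro he
      have := congrArg List.length he
      simp at this

theorem str_prefix_le (p q : String) (h : p.toList <+: q.toList) : p ≤ q := by
  by_cases he : p.toList = q.toList
  · exact le_of_eq (String.toList_inj.mp he)
  · apply le_of_lt
    rw [String.lt_iff_toList_lt]
    show List.Lex (· < ·) p.toList q.toList
    exact lex_of_prefix h he

theorem pairwise_le_getLast {l : List String} (hp : l.Pairwise (· ≤ ·)) (h : l ≠ [])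
    (x : String) (hx : x ∈ l) : x ≤ l.getLast h := by
  induction l with
  | nil => simp at hx
  | cons a t ih =>
    cases t with
    | nil => simp at hx; simp [hx, List.getLast]
    | cons b s =>
      rw [List.getLast_cons (by simp)]
      rcases List.mem_cons.mp hx with rfl | hx
      · exact List.rel_of_pairwise_cons hp (List.getLast_mem _)
      · exact ih (List.Pairwise.of_cons hp) (by simp) hx

theorem slice_eq_ofList_take (cur : String) (i : Nat) :
    PySem.Str.slice cur none (some (i : Int)) = String.ofList (cur.toList.take i) := by
  apply String.toList_inj.mp
  rw [PySem.Str.toList_slice, PySem.Chars.slice_eq_listSlice, PySem.List.slice_to_natCast,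
    String.toList_ofList]

theorem getLast!_eq_getLast (s : List String) (h : s ≠ []) : s.getLast! = s.getLast h := by
  induction s with
  | nil => simp at h
  | cons a t ih =>
    cases t with
    | nil => rfl
    | cons b u => rw [List.getLast_cons (by simp), ← ih (by simp)]; rfl

theorem altFind_none (fnames : List String) (cur : String) (n : Nat)
    (h : ∀ j < n, ¬ QD fnames cur.toList j) :
    altFind (PySem.Set.ofList fnames) cur n = "root" := by
  induction n with
  | zero => rfl
  | succ k ih =>
    have ihk := ih (fun j hj => h j (Nat.lt_succ_of_lt hj))
    simp only [altFind, PySem.Str.pyGet?_natCast, slice_eq_ofList_take]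
    split_ifs with h1 h2
    · exact absurd ⟨h1, (PySem.Set.mem_ofList fnames _).mp
        ((PySem.Set.contains_iff _ _).mp h2)⟩ (h k (Nat.lt_succ_self k))
    · exact ihk
    · exact ihk

theorem altFind_found (fnames : List String) (cur : String) (n m : Nat)
    (hm : QD fnames cur.toList m) (hmn : m < n)
    (hmax : ∀ j, m < j → j < n → ¬ QD fnames cur.toList j) :
    altFind (PySem.Set.ofList fnames) cur n = String.ofList (cur.toList.take m) := by
  induction n with
  | zero => omega
  | succ k ih =>
    by_cases hmk : m = k
    · subst hmk
      simp only [altFind, PySem.Str.pyGet?_natCast, slice_eq_ofList_take]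
      rw [if_pos hm.1, if_pos ((PySem.Set.contains_iff _ _).mpr
        ((PySem.Set.mem_ofList fnames _).mpr hm.2))]
    · have hk : ¬ QD fnames cur.toList k := hmax k (by omega) (Nat.lt_succ_self k)
      have ihk := ih (by omega) (fun j hj1 hj2 => hmax j hj1 (by omega))
      simp only [altFind, PySem.Str.pyGet?_natCast, slice_eq_ofList_take]
      split_ifs with h1 h2
      · exact absurd ⟨h1, (PySem.Set.mem_ofList fnames _).mp
          ((PySem.Set.contains_iff _ _).mp h2)⟩ hk
      · exact ihk
      · exact ihk

-- a passing candidate yields a witness index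
theorem cand_to_Q (fnames : List String) (cur f : String) (hf : f ∈ fnames)
    (hpre : f.toList ++ ['.'] <+: cur.toList) :
    QD fnames cur.toList f.toList.length ∧ f = String.ofList (cur.toList.take f.toList.length) := by
  obtain ⟨t, ht⟩ := hpre
  have hc : cur.toList = f.toList ++ ('.' :: t) := by rw [← ht]; simp
  have htake : cur.toList.take f.toList.length = f.toList := by rw [hc, List.take_left]
  have hget : cur.toList[f.toList.length]? = some '.' := by
    rw [hc, List.getElem?_append_right le_rfl]; simp
  refine ⟨⟨hget, ?_⟩, by rw [htake, String.ofList_toList]⟩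
  rw [htake, String.ofList_toList]; exact hf

-- a witness index yields a passing candidate
theorem Q_to_cand (fnames : List String) (cur : String) (i : Nat)
    (hq : QD fnames cur.toList i) :
    i < cur.toList.length ∧
    String.ofList (cur.toList.take i) ∈ fnames ∧
    String.ofList (cur.toList.take i) ≠ cur ∧
    PySem.Str.startswith cur (String.ofList (cur.toList.take i) ++ ".") = true := by
  obtain ⟨hdot, hmem⟩ := hq
  have hi : i < cur.toList.length := (List.getElem?_eq_some_iff.mp hdot).1
  have hpre : cur.toList.take i ++ ['.'] <+: cur.toList := by
    have h1 : cur.toList.take (i + 1) = cur.toList.take i ++ ['.'] := by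
      rw [List.take_add_one, hdot]; rfl
    rw [← h1]; exact List.take_prefix _ _
  refine ⟨hi, hmem, ?_, ?_⟩
  · intro he
    have := congrArg (fun s => s.toList.length) he
    simp only [String.toList_ofList, List.length_take] at this
    omega
  · rw [PySem.Str.startswith_eq, String.toList_append, String.toList_ofList]
    rw [PySem.Chars.startswith_iff]
    exact hpre

theorem parent_eq (fnames : List String) (cur : String) :
    (let candidates := PySem.List.sorted
      (fnames.filter (fun fname =>
        decide (fname ≠ cur) && PySem.Str.startswith cur (fname ++ ".")))
      (fun x => x) false
     if candidates.isEmpty then "root" else candidates.getLast!) =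
    altFind (PySem.Set.ofList fnames) cur cur.toList.length := by
  classical
  show (if (PySem.List.sorted
      (fnames.filter (fun fname =>
        decide (fname ≠ cur) && PySem.Str.startswith cur (fname ++ ".")))
      (fun x => x) false).isEmpty then "root" else
      (PySem.List.sorted
        (fnames.filter (fun fname =>
          decide (fname ≠ cur) && PySem.Str.startswith cur (fname ++ ".")))
        (fun x => x) false).getLast!) =
    altFind (PySem.Set.ofList fnames) cur cur.toList.length
  -- a filter hit is exactly a dot-prefix witness
  have hpred : ∀ f : String,
      ((decide (f ≠ cur) && PySem.Str.startswith cur (f ++ ".")) = true) ↔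
      (f ≠ cur ∧ f.toList ++ ['.'] <+: cur.toList) := by
    intro f
    rw [Bool.and_eq_true, decide_eq_true_eq, PySem.Str.startswith_eq, String.toList_append]
    have : String.toList "." = ['.'] := rfl
    rw [this, PySem.Chars.startswith_iff]
  by_cases hex : ∃ i, QD fnames cur.toList i
  · obtain ⟨i0, hQ0⟩ := hex
    have hi0 : i0 < cur.toList.length := (Q_to_cand fnames cur i0 hQ0).1
    set m := Nat.findGreatest (fun i => QD fnames cur.toList i) cur.toList.length with hmdef
    have hQm : QD fnames cur.toList m := Nat.findGreatest_spec hi0.le hQ0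
    have hmax : ∀ j, m < j → ¬ QD fnames cur.toList j := by
      intro j hj hQj
      exact Nat.findGreatest_is_greatest hj (Q_to_cand fnames cur j hQj).1.le hQj
    obtain ⟨hmlen, hmem, hne, hsw⟩ := Q_to_cand fnames cur m hQm
    rw [altFind_found fnames cur cur.toList.length m hQm hmlen (fun j h1 _ => hmax j h1)]
    set s := PySem.List.sorted
      (fnames.filter (fun fname =>
        decide (fname ≠ cur) && PySem.Str.startswith cur (fname ++ ".")))
      (fun x => x) false with hs
    have hf0 : String.ofList (cur.toList.take m) ∈ s := by
      rw [hs, PySem.List.mem_sorted, List.mem_filter]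
      exact ⟨hmem, by rw [Bool.and_eq_true, decide_eq_true_eq]; exact ⟨hne, hsw⟩⟩
    have hsne : s ≠ [] := List.ne_nil_of_mem hf0
    rw [if_neg (by simp [List.isEmpty_iff, hsne]), getLast!_eq_getLast s hsne]
    set g := s.getLast hsne with hg
    have hgmem : g ∈ s := List.getLast_mem hsne
    have hgf : g ∈ fnames ∧ g.toList ++ ['.'] <+: cur.toList := by
      rw [hs, PySem.List.mem_sorted, List.mem_filter] at hgmem
      exact ⟨hgmem.1, ((hpred g).mp hgmem.2).2⟩
    obtain ⟨hQg, hgeq⟩ := cand_to_Q fnames cur g hgf.1 hgf.2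
    have hjm : g.toList.length ≤ m := by
      by_contra hlt
      exact hmax _ (by omega) hQg
    apply le_antisymm
    · -- g ≤ f0 : g is a shorter take of cur
      apply str_prefix_le
      rw [String.toList_ofList]
      have : g.toList = cur.toList.take g.toList.length := by
        conv_lhs => rw [hgeq]
        rw [String.toList_ofList]
      rw [this]
      exact List.take_prefix_take_left hjm
    · -- f0 ≤ g : g is the last of the sorted list
      have hp : s.Pairwise (· ≤ ·) := by
        have := PySem.List.sorted_pairwise
          (fnames.filter (fun fname =>
            decide (fname ≠ cur) && PySem.Str.startswith cur (fname ++ ".")))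
          (fun x => x)
        exact this
      exact pairwise_le_getLast hp hsne _ hf0
  · have hfil : fnames.filter (fun fname =>
        decide (fname ≠ cur) && PySem.Str.startswith cur (fname ++ ".")) = [] := by
      rw [List.filter_eq_nil_iff]
      intro f hf hpf
      exact hex ⟨f.toList.length, (cand_to_Q fnames cur f hf ((hpred f).mp hpf).2).1⟩
    rw [hfil]
    rw [altFind_none fnames cur cur.toList.length (fun j _ hQj => hex ⟨j, hQj⟩)]
    rfl

-- ===== VERDICT (by name: the statement is the Claim_ definition above) =====
theorem build_note_tree_spec : Claim_equal_build_note_tree := by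
  intro fnames _
  show build_note_tree fnames = build_note_tree_alt fnames
  show (((fnames.filter (fun fname => decide (fname ≠ "root"))).foldl
      (fun tree current_fname =>
        tree.insert current_fname
          (if (PySem.List.sorted
            (fnames.filter (fun fname =>
              decide (fname ≠ current_fname) && PySem.Str.startswith current_fname (fname ++ ".")))
            (fun x => x) false).isEmpty then "root" else
            (PySem.List.sorted
              (fnames.filter (fun fname =>
                decide (fname ≠ current_fname) && PySem.Str.startswith current_fname (fname ++ ".")))
              (fun x => x) false).getLast!))
      (PySem.Dict.insert PySem.Dict.empty "root" "")).items) =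
    ((fnames.foldl
      (fun tree cur => if cur = "root" then tree
        else tree.insert cur (altFind (PySem.Set.ofList fnames) cur cur.toList.length))
      (PySem.Dict.insert PySem.Dict.empty "root" "")).items)
  rw [List.foldl_filter]
  have hfun : (fun (x : PySem.Dict String String) (y : String) =>
      if decide (y ≠ "root") = true then
        x.insert y
          (if (PySem.List.sorted
            (fnames.filter (fun fname => decide (fname ≠ y) && PySem.Str.startswith y (fname ++ ".")))
            (fun x => x) false).isEmpty then "root" else
            (PySem.List.sorted
              (fnames.filter (fun fname => decide (fname ≠ y) && PySem.Str.startswith y (fname ++ ".")))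
              (fun x => x) false).getLast!)
      else x) =
      (fun (tree : PySem.Dict String String) (cur : String) =>
        if cur = "root" then tree
        else tree.insert cur (altFind (PySem.Set.ofList fnames) cur cur.toList.length)) := by
    funext tree cur
    by_cases hr : cur = "root"
    · simp [hr]
    · rw [if_pos (by simp [hr]), if_neg hr, ← parent_eq]
  rw [hfun]
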